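-- pv_equiv track=rewrite | github.com/SJTU-YONGFU-RESEARCH-GRP/core-cc | src/turbo_ecc.py | _rsc_encode
-- ===== SOURCE A (Python) =====
-- from typing import Tuple, List
--
-- def _rsc_encode(data_bits: List[int], encoder_state: List[int]) -> List[int]:
--     """
--     Encode using recursive systematic convolutional code.
--
--     Args:
--         data_bits: Input data bits
--         encoder_state: Current encoder state
--
--     Returns:
--         Parity bits
--     """
--     parity_bits = []
--     state = encoder_state.copy()
--
--     for bit in data_bits:
--         # Simple RSC: parity = (bit + state[0] + state[1]) % 2
--         parity = (bit + state[0] + state[1]) % 2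
--         parity_bits.append(parity)
--
--         # Update state: shift and add new bit
--         state[1] = state[0]
--         state[0] = bit
--
--     return parity_bits
-- ===== SOURCE B (Python) =====
-- from typing import List
--
-- def _rsc_encode(data_bits: List[int], encoder_state: List[int]) -> List[int]:
--     # Window view: prepend the seed state (reversed) and take each parity as
--     # the mod-2 sum of a sliding window of three, instead of shifting a register.
--     ext = [encoder_state[1], encoder_state[0], *data_bits]
--     return [(a + b + c) % 2 for a, b, c in zip(ext, ext[1:], ext[2:])]
-- ===== Notes on version B (the rewrite author's own statement) =====
-- stated objective: simpler
-- what changed: Replaces the maintained two-element shift register updated each iteration by a single concatenated array [state[1], state[0]] + data_bits whose sliding 3-windows give the parities directly; Pre_ excludes encoder_state shorter than 2, where A returns [] only for empty data_bits (B's natural window construction raises IndexError there).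
-- outside the precondition, e.g. on _rsc_encode([], [0]): A returns [], B raises IndexError; on _rsc_encode([], []): A returns [], B raises IndexError
import Mathlib
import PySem

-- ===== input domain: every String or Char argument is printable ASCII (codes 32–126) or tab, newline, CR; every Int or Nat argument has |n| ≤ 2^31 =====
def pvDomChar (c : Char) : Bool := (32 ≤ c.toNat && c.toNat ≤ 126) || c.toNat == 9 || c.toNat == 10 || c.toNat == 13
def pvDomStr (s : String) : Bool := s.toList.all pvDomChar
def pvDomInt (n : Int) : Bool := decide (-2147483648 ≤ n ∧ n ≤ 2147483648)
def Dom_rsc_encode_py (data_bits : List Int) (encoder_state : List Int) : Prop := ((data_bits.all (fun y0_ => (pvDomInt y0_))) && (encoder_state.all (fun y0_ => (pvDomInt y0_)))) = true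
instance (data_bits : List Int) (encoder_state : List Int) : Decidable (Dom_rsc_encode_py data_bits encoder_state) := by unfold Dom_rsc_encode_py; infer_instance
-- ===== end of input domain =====

-- B replaces A's per-step shift register with a sliding 3-window over one concatenated array (simpler).


-- ===== PORT A =====
-- Loop over data_bits maintaining the mutable state list; state[0]/state[1] are
-- in range whenever Pre_ holds (Python raises IndexError otherwise, excluded by Pre_;
-- the .getD 0 default is never reached inside Pre_).
def rsc_encode_py_go : List Int → List Int → List Int → List Int
  | [], _, parity_bits => parity_bits
  | bit :: rest, state, parity_bits =>
      let parity := PySem.Int.mod (bit + state.getD 0 0 + state.getD 1 0) 2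
      let state' := (state.set 1 (state.getD 0 0)).set 0 bit
      rsc_encode_py_go rest state' (parity_bits ++ [parity])

def rsc_encode_py (data_bits : List Int) (encoder_state : List Int) : List Int :=
  rsc_encode_py_go data_bits encoder_state []

-- ===== PORT B =====
-- ext = [state[1], state[0]] ++ data_bits; parities are mod-2 sums of sliding 3-windows
-- (ext[1:], ext[2:] are the slices from Source B, exact as drop for nonnegative start).
def rsc_encode_py_alt (data_bits : List Int) (encoder_state : List Int) : List Int :=
  let ext := encoder_state.getD 1 0 :: encoder_state.getD 0 0 :: data_bits
  List.zipWith3 (fun a b c => PySem.Int.mod (a + b + c) 2) ext (ext.drop 1) (ext.drop 2)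

-- ===== PRECONDITION & SPEC =====
-- Pre_ excludes encoder_state with fewer than 2 elements: there A raises IndexError for
-- nonempty data_bits, and returns [] only for empty data_bits, where B's natural window
-- construction itself raises IndexError.
def Pre_rsc_encode_py (_data_bits : List Int) (encoder_state : List Int) : Prop :=
  2 ≤ encoder_state.length
instance (data_bits : List Int) (encoder_state : List Int) : Decidable (Pre_rsc_encode_py data_bits encoder_state) := by unfold Pre_rsc_encode_py; infer_instance
def pvWitness_rsc_encode_py : List Int × List Int := ([1, 0, 1, 1], [0, 1])

def Spec_rsc_encode_py (data_bits : List Int) (encoder_state : List Int) (out : List Int) : Prop := out = rsc_encode_py_alt data_bits encoder_state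
instance (data_bits : List Int) (encoder_state : List Int) (out : List Int) : Decidable (Spec_rsc_encode_py data_bits encoder_state out) := by unfold Spec_rsc_encode_py; infer_instance

-- ===== CLAIM (what is proved, stated in full; the proofs are below) =====
def Claim_equal_rsc_encode_py : Prop := ∀ (data_bits : List Int) (encoder_state : List Int), Dom_rsc_encode_py data_bits encoder_state → Pre_rsc_encode_py data_bits encoder_state → Spec_rsc_encode_py data_bits encoder_state (rsc_encode_py data_bits encoder_state)

-- ===== LEMMAS AND PROOFS =====

-- Invariant of A's loop: with state[0] = a, state[1] = b (length ≥ 2), the remaining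
-- run equals the accumulated prefix followed by B's window parities over b :: a :: bits.
theorem rsc_encode_py_go_eq (bits : List Int) :
    ∀ (state acc : List Int) (a b : Int),
      2 ≤ state.length → state.getD 0 0 = a → state.getD 1 0 = b →
      rsc_encode_py_go bits state acc =
        acc ++ List.zipWith3 (fun x y z => PySem.Int.mod (x + y + z) 2)
          (b :: a :: bits) (a :: bits) bits := by
  induction bits with
  | nil => intro state acc a b _ _ _; simp [rsc_encode_py_go, List.zipWith3]
  | cons bit rest ih =>
    intro state acc a b hlen h0 h1
    obtain ⟨s0, s1, tl, rfl⟩ : ∃ s0 s1 tl, state = s0 :: s1 :: tl := by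
      match state, hlen with
      | s0 :: s1 :: tl, _ => exact ⟨s0, s1, tl, rfl⟩
    simp [List.getD] at h0 h1
    subst h0; subst h1
    simp only [rsc_encode_py_go]
    have hs : (((s0 :: s1 :: tl).set 1 ((s0 :: s1 :: tl).getD 0 0)).set 0 bit) = bit :: s0 :: tl := by
      simp [List.getD]
    rw [hs, ih (bit :: s0 :: tl) _ bit s0 (by simp) (by simp [List.getD]) (by simp [List.getD])]
    simp only [List.zipWith3, List.getD, List.append_assoc, List.singleton_append]
    congr 3
    simp only [List.getElem?_cons_zero, List.getElem?_cons_succ, Option.getD_some]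
    ring

theorem rsc_encode_py_spec_aux (data_bits encoder_state : List Int)
    (h : 2 ≤ encoder_state.length) :
    rsc_encode_py data_bits encoder_state = rsc_encode_py_alt data_bits encoder_state := by
  unfold rsc_encode_py rsc_encode_py_alt
  rw [rsc_encode_py_go_eq data_bits encoder_state [] (encoder_state.getD 0 0) (encoder_state.getD 1 0) h rfl rfl]
  simp

-- ===== VERDICT (by name: the statement is the Claim_ definition above) =====
theorem rsc_encode_py_spec : Claim_equal_rsc_encode_py := by
  intro data_bits encoder_state _ hpre
  unfold Spec_rsc_encode_py
  exact rsc_encode_py_spec_aux data_bits encoder_state hpre
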